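-- pv_equiv track=rewrite | github.com/jjimly/Coding | Task I : Phone bill calculation/Calculation.py | solution
-- ===== SOURCE A (Python) =====
-- import math
--
-- def solution(S):
--     # 用 '\n' 拆分每條記錄
--     call_logs = S.split('\n')
--
--     # 用於存儲每個電話號碼的總時長和總費用的字典
--     total_durations = {}
--     call_costs = {}
--
--     for log in call_logs:
--         # 忽略空行
--         if not log.strip():
--             continue
--
--         # 拆分時長和電話號碼
--         duration, phone_number = log.split(',')
--
--         # 將 hh:mm:ss 轉換為總秒數
--         hh, mm, ss = map(int, duration.split(':'))
--         total_seconds = hh * 3600 + mm * 60 + ss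
--
--         # 計算通話的費用
--         if total_seconds < 300:
--             cost = total_seconds * 3  # 每秒 3 分
--         else:
--             # 計算總分鐘數（無條件進位）
--             total_minutes = math.ceil(total_seconds / 60)
--             cost = total_minutes * 150  # 每分鐘 150 分
--
--         # 更新電話號碼的總時長和費用
--         if phone_number in total_durations:
--             total_durations[phone_number] += total_seconds
--             call_costs[phone_number] += cost
--         else:
--             total_durations[phone_number] = total_seconds
--             call_costs[phone_number] = cost
--
--     # 找出總通話時長最長的電話號碼
--     max_duration = -1
--     longest_duration_phone_number = None
--
--     for phone_number, duration in total_durations.items():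
--         if duration > max_duration:
--             max_duration = duration
--             longest_duration_phone_number = phone_number
--         elif duration == max_duration:
--             # 如果有相同時長，選擇數值最小的電話號碼
--             if phone_number < longest_duration_phone_number:
--                 longest_duration_phone_number = phone_number
--
--     # 計算排除最長時長電話號碼後的總費用
--     total_cost = 0
--     for phone_number, cost in call_costs.items():
--         if phone_number != longest_duration_phone_number:
--             total_cost += cost
--
--     return total_cost
-- ===== SOURCE B (Python) =====
-- import math
--
-- def solution(S):
--     # Flat list of per-line records (phone, seconds, cost) -- no aggregation dict.
--     # The phone to exclude is the keyed minimum over the distinct phones by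
--     # (-total seconds, phone); the bill is the sum of costs of all other lines.
--     records = []
--     for log in S.split('\n'):
--         if not log.strip():
--             continue
--         duration, phone = log.split(',')
--         hh, mm, ss = map(int, duration.split(':'))
--         secs = hh * 3600 + mm * 60 + ss
--         records.append((phone, secs,
--                         secs * 3 if secs < 300 else math.ceil(secs / 60) * 150))
--     if not records:
--         return 0
--     phones = []
--     for p, _, _ in records:
--         if p not in phones:
--             phones.append(p)
--     total = lambda p: sum(s for q, s, _ in records if q == p)
--     best = min(phones, key=lambda p: (-total(p), p))
--     return sum(c for q, _, c in records if q != best)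
-- ===== Notes on version B (the rewrite author's own statement) =====
-- stated objective: alternative
-- what changed: B drops A's two aggregation dicts entirely: it keeps a flat list of per-line (phone, seconds, cost) records, picks the excluded phone as min over the distinct phones keyed by (-total seconds, phone) with the totals recomputed by filtered sums, and bills with one filtered sum over the records, replacing A's dict building, sentinel scan and re-summation.
-- intended difference: On inputs whose per-phone totals are all below -1 seconds (possible only with negative duration fields), A's -1 running-max sentinel never selects a phone so A bills every phone (e.g. -15 on '0:0:-5,7'); B excludes the longest-duration phone (0 there), which is what the task specifies. — e.g. on solution("0:0:-5,7"): A returns -15, B returns 0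
-- crash fix: A raises TypeError ('<' between str and None) when the first per-phone total reaching -1 equals -1 exactly (e.g. '0:0:-1,8'); B returns the bill excluding the longest-duration phone (0 there). A also raises ValueError on malformed lines and OverflowError on astronomically long durations; B raises there too. — e.g. on solution("0:0:-1,8"): A raises TypeError, B returns 0
import Mathlib
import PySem

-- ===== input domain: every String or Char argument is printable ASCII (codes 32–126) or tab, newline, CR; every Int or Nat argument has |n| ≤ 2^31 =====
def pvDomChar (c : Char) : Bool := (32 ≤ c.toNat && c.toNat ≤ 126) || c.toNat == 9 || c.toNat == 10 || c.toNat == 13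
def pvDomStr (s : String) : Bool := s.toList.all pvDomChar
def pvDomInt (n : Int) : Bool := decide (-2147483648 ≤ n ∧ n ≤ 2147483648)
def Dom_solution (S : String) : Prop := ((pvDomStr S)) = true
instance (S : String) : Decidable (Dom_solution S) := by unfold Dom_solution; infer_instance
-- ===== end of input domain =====

-- B drops A's aggregation dicts: it keeps a flat list of per-line (phone, seconds, cost)
-- records, picks the excluded phone as a keyed minimum over the distinct phones by
-- (-total seconds, phone), and bills by one filtered sum (objective: alternative).

-- ===== shared helpers (the line-parsing and cost rule both Pythons share verbatim) =====

-- s.split(sep) for a non-empty literal sep (exact there: split? is none only for sep = "")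
def pvSplit (s sep : String) : List String := (PySem.Str.split? s sep).getD []

-- duration, phone = log.split(','); hh, mm, ss = map(int, duration.split(':'))
-- none = the ValueError Python raises on a malformed line (excluded by Pre_solution)
def pvParse (log : String) : Option (Int × String) :=
  match pvSplit log "," with
  | [duration, phone] =>
    match (pvSplit duration ":").map PySem.Int.ofStr? with
    | [some hh, some mm, some ss] => some (hh * 3600 + mm * 60 + ss, phone)
    | _ => none
  | _ => none

-- round num/den (den > 0) to the nearest integer, ties to even: IEEE-754 rounding of a ratio
def pvRne (num den : Int) : Int :=
  let f := PySem.Int.floordiv num den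
  let r := num - f * den
  if 2 * r < den then f
  else if den < 2 * r then f + 1
  else if f % 2 = 0 then f else f + 1

-- math.ceil(q / 60): q/60 is Python FLOAT division, so the nearest double is taken first.
-- Exact for 300 ≤ q < 60·(2^1024 − 2^970); beyond that Python raises OverflowError
-- (excluded by Pre_solution); below 300 this helper is never called.
-- = 60 * (2^1024 - 2^970), written out so that deciding Pre_ needs no deep pow recursion
def pvOF : Int := 10786158809173894847623738284318204904796047962602269616170426738826698097565885056798941078655232425779817185001573274656793332871116424157839449320290349240914534120042503020576431290749062691905868543816204191334282017577370574889191650096188517563144450106661930642260562693581970485582572810674250469867520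

def pvCeilF (q : Int) : Int :=
  let k := PySem.Int.floordiv q 60
  let bl := k.toNat.log2 + 1
  if bl ≤ 53 then
    -(PySem.Int.floordiv (-(pvRne (q * (2 ^ (53 - bl) : Int)) 60)) ((2 ^ (53 - bl) : Int)))
  else
    pvRne q (60 * 2 ^ (bl - 53)) * 2 ^ (bl - 53)

-- the cost rule both Pythons share verbatim
def pvCost (secs : Int) : Int := if secs < 300 then secs * 3 else pvCeilF secs * 150

-- ===== PORT A =====
-- loop body: two dicts, total_durations and call_costs
def solutionStepA (st : PySem.Dict String Int × PySem.Dict String Int) (log : String) :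
    PySem.Dict String Int × PySem.Dict String Int :=
  if PySem.Str.strip log = "" then st
  else
    match pvParse log with
    | none => st  -- Python raises ValueError here; unreachable under Pre_solution
    | some (secs, phone) =>
        let cost := pvCost secs
        if st.1.contains phone then
          (st.1.modify phone 0 (· + secs), st.2.modify phone 0 (· + cost))
        else
          (st.1.insert phone secs, st.2.insert phone cost)

-- second loop: running (max_duration, longest_duration_phone_number) over total_durations.items()
def solutionScanA (acc : Int × Option String) (kv : String × Int) : Int × Option String :=
  if kv.2 > acc.1 then (kv.2, some kv.1)
  else if kv.2 = acc.1 then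
    match acc.2 with
    | some cur => if kv.1 < cur then (acc.1, some kv.1) else acc
    | none => acc  -- Python raises TypeError (str < None); unreachable under Pre_solution
  else acc

def solution (S : String) : Int :=
  let callLogs := pvSplit S "\n"
  let st := callLogs.foldl solutionStepA (PySem.Dict.empty, PySem.Dict.empty)
  let m := st.1.items.foldl solutionScanA (-1, none)
  st.2.items.foldl (fun tc kv => if some kv.1 ≠ m.2 then tc + kv.2 else tc) 0

-- ===== PORT B =====
-- records.append((phone, secs, cost)) for every non-blank line
def solutionStepB (acc : List (String × Int × Int)) (log : String) : List (String × Int × Int) :=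
  if PySem.Str.strip log = "" then acc
  else
    match pvParse log with
    | none => acc  -- Python raises ValueError here; unreachable under Pre_solution
    | some (secs, phone) => acc ++ [(phone, secs, pvCost secs)]

def solution_alt (S : String) : Int :=
  let records := (pvSplit S "\n").foldl solutionStepB []
  if records = [] then 0
  else
    -- phones: the distinct phone numbers in first-appearance order
    let phones := records.foldl (fun acc r => if r.1 ∈ acc then acc else acc ++ [r.1]) []
    -- total = lambda p: sum(s for q, s, _ in records if q == p)
    let total := fun p => ((records.filter (fun r => r.1 == p)).map (fun r => r.2.1)).sum
    -- best = min(phones, key=lambda p: (-total(p), p))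
    match PySem.List.min2? phones (fun p => -(total p)) (fun p => p) with
    | some best => ((records.filter (fun r => decide (r.1 ≠ best))).map (fun r => r.2.2)).sum
    | none => 0  -- unreachable: phones is non-empty when records is

-- ===== PRECONDITION & SPEC =====
-- spec-level view of the parsed input: the (secs, phone) records of the non-blank lines,
-- the distinct phones in first-appearance order, and each phone's total seconds
def pvRecsL (lines : List String) : List (Int × String) :=
  lines.filterMap (fun log => if PySem.Str.strip log = "" then none else pvParse log)

def pvRecs (S : String) : List (Int × String) := pvRecsL (pvSplit S "\n")

def pvTsum (R : List (Int × String)) (p : String) : Int :=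
  match R with
  | [] => 0
  | r :: R' => (if r.2 = p then r.1 else 0) + pvTsum R' p

-- a line is fine iff it is blank or parses, with its seconds below the float-overflow bound
def pvLineOK (log : String) : Bool :=
  PySem.Str.strip log == "" ||
  (match pvParse log with
   | some (secs, _) => decide (secs < pvOF)
   | none => false)

-- the first phone (in first-appearance order) whose total is ≥ -1, if any: A's scan seeds
-- its running max with the sentinel -1, and compares 'phone < None' exactly when this
-- phone's total EQUALS -1 (TypeError)
def pvFirstGE (S : String) : Option String :=
  (((pvRecs S).dropWhile (fun r => decide (pvTsum (pvRecs S) r.2 < -1))).head?).map (fun r => r.2)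

def pvNoTypeError (S : String) : Bool :=
  match pvFirstGE S with
  | some q => decide (pvTsum (pvRecs S) q > -1)
  | none => true

-- Pre_ excludes exactly the inputs where A raises: malformed lines (ValueError), seconds so
-- large that secs/60 overflows a Python float (OverflowError), and inputs whose first
-- phone total reaching -1 does so exactly, where A compares a str with None (TypeError).
def Pre_solution (S : String) : Prop :=
  (∀ log ∈ pvSplit S "\n", pvLineOK log = true) ∧ pvNoTypeError S = true
instance (S : String) : Decidable (Pre_solution S) := by unfold Pre_solution; infer_instance

def pvWitness_solution : String := "0:0:30,1\n0:5:0,2"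

-- On inputs whose per-phone totals are all < -1 (possible only with negative duration
-- fields), A's -1 running-max sentinel never selects a phone, so A bills EVERY phone;
-- B excludes the longest-duration phone as the task intends.
def D_solution (S : String) : Prop :=
  pvRecs S ≠ [] ∧ ∀ r ∈ pvRecs S, pvTsum (pvRecs S) r.2 < -1
instance (S : String) : Decidable (D_solution S) := by unfold D_solution; infer_instance

def Spec_solution (S : String) (out : Int) : Prop := ¬ D_solution S → out = solution_alt S
instance (S : String) (out : Int) : Decidable (Spec_solution S out) := by unfold Spec_solution; infer_instance

def pvDiffWitness_solution : String := "0:0:-5,7"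
def pvDiffWitnessOut_solution : Int × Int := (-15, 0)

-- A raises TypeError ('<' between str and None) when the first phone total reaching -1
-- equals -1 exactly; B returns the bill excluding the longest-duration phone there.
def pvRaiseHead (S : String) : Bool :=
  match pvFirstGE S with
  | some q => decide (pvTsum (pvRecs S) q = -1)
  | none => false

def Raises_solution (S : String) : Prop :=
  (∀ log ∈ pvSplit S "\n", pvLineOK log = true) ∧ pvRaiseHead S = true
instance (S : String) : Decidable (Raises_solution S) := by unfold Raises_solution; infer_instance

def pvRaiseWitness_solution : String := "0:0:-1,8"
def pvRaiseWitnessOut_solution : Int := 0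

-- ===== CLAIM (what is proved, stated in full; the proofs are below) =====
def Claim_unchanged_solution : Prop :=
  ∀ (S : String), Dom_solution S → Pre_solution S → Spec_solution S (solution S)
def Claim_changed_solution : Prop :=
  Dom_solution (pvDiffWitness_solution) ∧ Pre_solution (pvDiffWitness_solution) ∧
  D_solution (pvDiffWitness_solution) ∧
  solution (pvDiffWitness_solution) = pvDiffWitnessOut_solution.1 ∧
  solution_alt (pvDiffWitness_solution) = pvDiffWitnessOut_solution.2 ∧
  pvDiffWitnessOut_solution.1 ≠ pvDiffWitnessOut_solution.2
def Claim_exact_solution : Prop :=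
  ∀ (S : String), Dom_solution S → Pre_solution S → D_solution S → solution S ≠ solution_alt S
def Claim_raises_solution : Prop :=
  (∀ (S : String), Dom_solution S → Raises_solution S → ¬ Pre_solution S) ∧
  (Dom_solution (pvRaiseWitness_solution) ∧ Raises_solution (pvRaiseWitness_solution) ∧
   solution_alt (pvRaiseWitness_solution) = pvRaiseWitnessOut_solution)

-- ===== LEMMAS AND PROOFS =====

-- the distinct phones in first-appearance order (used only by the proofs)
def pvPhones (R : List (Int × String)) : List String :=
  R.foldl (fun acc r => if r.2 ∈ acc then acc else acc ++ [r.2]) []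

-- each phone's total cost (used only by the proofs)
def pvCsum (R : List (Int × String)) (p : String) : Int :=
  ((R.filter (fun r => r.2 == p)).map (fun r => pvCost r.1)).sum

-- the dict pair A's first loop reaches after ingesting the records R
def pvDicts (R : List (Int × String)) : PySem.Dict String Int × PySem.Dict String Int :=
  (PySem.Dict.mk ((pvPhones R).map (fun p => (p, pvTsum R p))),
   PySem.Dict.mk ((pvPhones R).map (fun p => (p, pvCsum R p))))


-- B's record loop is the spec records, mapped to (phone, secs, cost)
def pvRecF (r : Int × String) : String × Int × Int := (r.2, r.1, pvCost r.1)

lemma recB_eq (lines : List String) (acc : List (String × Int × Int)) :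
    lines.foldl solutionStepB acc = acc ++ (pvRecsL lines).map pvRecF := by
  induction lines generalizing acc with
  | nil => simp [pvRecsL]
  | cons l t ih =>
      rw [List.foldl_cons, ih]
      by_cases hb : PySem.Str.strip l = ""
      · simp [solutionStepB, pvRecsL, hb]
      · match hp : pvParse l with
        | none => simp [solutionStepB, pvRecsL, hb, hp]
        | some (secs, phone) => simp [solutionStepB, pvRecsL, hb, hp, pvRecF]

lemma phones_eq (R : List (Int × String)) :
    (R.map pvRecF).foldl (fun acc r => if r.1 ∈ acc then acc else acc ++ [r.1]) [] = pvPhones R := by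
  rw [pvPhones, List.foldl_map]; rfl

lemma total_eq (R : List (Int × String)) (p : String) :
    (((R.map pvRecF).filter (fun r => r.1 == p)).map (fun r => r.2.1)).sum = pvTsum R p := by
  induction R with
  | nil => rfl
  | cons r R' ih =>
      rw [List.map_cons, List.filter_cons]
      by_cases h : r.2 = p
      · rw [if_pos (by simp [pvRecF, h]), List.map_cons, List.sum_cons, ih, pvTsum, if_pos h]
        rfl
      · rw [if_neg (by simp [pvRecF, h]), ih, pvTsum, if_neg h, zero_add]

lemma costfilter_eq (R : List (Int × String)) (b : String) :
    (((R.map pvRecF).filter (fun r => decide (r.1 ≠ b))).map (fun r => r.2.2)).sum =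
      ((R.filter (fun r => decide (r.2 ≠ b))).map (fun r => pvCost r.1)).sum := by
  rw [List.filter_map, List.map_map]; rfl

-- ----- the A-side dict invariant -----

lemma get?_mkmap (P : List String) (f : String → Int) (q : String) :
    (PySem.Dict.mk (P.map (fun p => (p, f p)))).get? q = if q ∈ P then some (f q) else none := by
  induction P with
  | nil => simp [PySem.Dict.get?]
  | cons p t ih =>
      simp only [List.map_cons, PySem.Dict.get?_mk_cons]
      by_cases h : p = q
      · simp [h]
      · simp [h, ih, beq_iff_eq, Ne.symm h]

lemma contains_mkmap (P : List String) (f : String → Int) (q : String) :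
    (PySem.Dict.mk (P.map (fun p => (p, f p)))).contains q = decide (q ∈ P) := by
  rw [PySem.Dict.contains_eq_isSome_get?, get?_mkmap]
  by_cases h : q ∈ P <;> simp [h]

lemma mem_phones_foldl (R : List (Int × String)) (q : String) :
    ∀ acc, (q ∈ R.foldl (fun acc r => if r.2 ∈ acc then acc else acc ++ [r.2]) acc)
      ↔ q ∈ acc ∨ q ∈ R.map (·.2) := by
  induction R with
  | nil => simp
  | cons x t ih =>
      intro acc
      rw [List.foldl_cons]
      by_cases h : x.2 ∈ acc
      · rw [if_pos h, ih]
        simp only [List.map_cons, List.mem_cons]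
        constructor
        · rintro (ha | ht) <;> tauto
        · rintro (ha | he | ht)
          · tauto
          · exact Or.inl (he ▸ h)
          · tauto
      · rw [if_neg h, ih]
        simp only [List.mem_append, List.map_cons, List.mem_cons]
        tauto

lemma mem_pvPhones (R : List (Int × String)) (q : String) :
    q ∈ pvPhones R ↔ q ∈ R.map (·.2) := by
  rw [pvPhones, mem_phones_foldl]; simp

lemma nodup_phones_foldl (R : List (Int × String)) :
    ∀ acc, acc.Nodup → (R.foldl (fun acc r => if r.2 ∈ acc then acc else acc ++ [r.2]) acc).Nodup := by
  induction R with
  | nil => exact fun acc h => h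
  | cons x t ih =>
      intro acc hacc
      rw [List.foldl_cons]
      by_cases h : x.2 ∈ acc
      · rw [if_pos h]; exact ih _ hacc
      · rw [if_neg h]
        refine ih _ (List.Nodup.append hacc (List.nodup_singleton _) ?_)
        intro a ha hb
        rw [List.mem_singleton] at hb
        exact h (hb ▸ ha)

lemma nodup_pvPhones (R : List (Int × String)) : (pvPhones R).Nodup :=
  nodup_phones_foldl R [] List.nodup_nil

lemma pvPhones_append (R : List (Int × String)) (x : Int × String) :
    pvPhones (R ++ [x]) = if x.2 ∈ pvPhones R then pvPhones R else pvPhones R ++ [x.2] := by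
  rw [pvPhones, List.foldl_append]; rfl

lemma pvTsum_append (R : List (Int × String)) (x : Int × String) (q : String) :
    pvTsum (R ++ [x]) q = pvTsum R q + (if x.2 = q then x.1 else 0) := by
  induction R with
  | nil => simp [pvTsum]
  | cons r R' ih =>
      rw [List.cons_append, pvTsum, ih, pvTsum]
      ring

lemma pvCsum_append (R : List (Int × String)) (x : Int × String) (q : String) :
    pvCsum (R ++ [x]) q = pvCsum R q + (if x.2 = q then pvCost x.1 else 0) := by
  rw [pvCsum, pvCsum, List.filter_append]
  by_cases h : x.2 = q <;> simp [h]

lemma pvTsum_of_not_mem (R : List (Int × String)) (q : String) (h : q ∉ R.map (·.2)) :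
    pvTsum R q = 0 := by
  induction R with
  | nil => rfl
  | cons r R' ih =>
      rw [pvTsum, if_neg (fun he => h (by rw [← he]; exact List.mem_map_of_mem List.mem_cons_self)),
        zero_add]
      exact ih (fun hm => h (by simp only [List.map_cons, List.mem_cons]; exact Or.inr hm))

lemma pvCsum_of_not_mem (R : List (Int × String)) (q : String) (h : q ∉ R.map (·.2)) :
    pvCsum R q = 0 := by
  rw [pvCsum, List.filter_eq_nil_iff.mpr, List.map_nil, List.sum_nil]
  intro r hr hq
  have hm := List.mem_map_of_mem (f := fun x => x.2) hr
  simp only at hm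
  rw [beq_iff_eq.mp hq] at hm
  exact h hm

lemma dicts_step (R0 : List (Int × String)) (log : String) :
    solutionStepA (pvDicts R0) log = pvDicts (R0 ++ pvRecsL [log]) := by
  by_cases hb : PySem.Str.strip log = ""
  · simp [solutionStepA, pvRecsL, hb]
  · match hp : pvParse log with
    | none => simp [solutionStepA, pvRecsL, hb, hp]
    | some (secs, phone) =>
        have hrecs : pvRecsL [log] = [(secs, phone)] := by simp [pvRecsL, hb, hp]
        rw [hrecs]
        unfold solutionStepA
        rw [if_neg hb]
        simp only [hp]
        have hc1 : (pvDicts R0).1.contains phone = decide (phone ∈ pvPhones R0) :=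
          contains_mkmap _ _ _
        by_cases hmem : phone ∈ pvPhones R0
        · -- phone present: both dicts replace in place
          rw [hc1, if_pos (by simp [hmem])]
          have hph : pvPhones (R0 ++ [(secs, phone)]) = pvPhones R0 := by
            rw [pvPhones_append]; simp [hmem]
          unfold pvDicts PySem.Dict.modify
          apply Prod.ext
          all_goals {
            apply PySem.Dict.ext
            rw [PySem.Dict.items_insert_of_contains _ _ (by
              rw [contains_mkmap]; simp [hmem])]
            simp only [hph]
            rw [List.map_map]
            apply List.map_congr_left
            intro p hp'
            simp only [Function.comp_apply]
            rw [PySem.Dict.getD_eq_get?_getD, get?_mkmap, if_pos hmem]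
            by_cases hpq : p = phone
            · subst hpq
              simp [pvTsum_append, pvCsum_append]
            · have : (p == phone) = false := by simp [hpq]
              simp [this, pvTsum_append, pvCsum_append, Ne.symm hpq]
          }
        · -- new phone: both dicts append
          rw [hc1, if_neg (by simp [hmem])]
          have hph : pvPhones (R0 ++ [(secs, phone)]) = pvPhones R0 ++ [phone] := by
            rw [pvPhones_append]; simp [hmem]
          have hnot : phone ∉ R0.map (·.2) := by rwa [← mem_pvPhones]
          unfold pvDicts
          apply Prod.ext
          all_goals {
            apply PySem.Dict.ext
            rw [PySem.Dict.items_insert_of_not_contains _ _ (by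
              rw [contains_mkmap]; simp [hmem])]
            simp only [hph, List.map_append, List.map_cons, List.map_nil]
            congr 1
            · apply List.map_congr_left
              intro p hp'
              have hpq : p ≠ phone := fun he => hmem (he ▸ hp')
              simp [pvTsum_append, pvCsum_append, Ne.symm hpq]
            · simp [pvTsum_append, pvCsum_append,
                pvTsum_of_not_mem R0 phone hnot, pvCsum_of_not_mem R0 phone hnot]
          }

lemma pvRecsL_cons (l : String) (t : List String) :
    pvRecsL (l :: t) = pvRecsL [l] ++ pvRecsL t := by
  by_cases hb : PySem.Str.strip l = ""
  · simp [pvRecsL, hb]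
  · match hp : pvParse l with
    | none => simp [pvRecsL, hb, hp]
    | some r => simp [pvRecsL, hb, hp]

lemma dicts_fold (lines : List String) : ∀ R0,
    lines.foldl solutionStepA (pvDicts R0) = pvDicts (R0 ++ pvRecsL lines) := by
  induction lines with
  | nil => intro R0; simp [pvRecsL]
  | cons l t ih =>
      intro R0
      rw [List.foldl_cons, dicts_step, ih, List.append_assoc, ← pvRecsL_cons]

lemma dicts_empty : (PySem.Dict.empty, PySem.Dict.empty) = pvDicts ([] : List (Int × String)) := rfl


-- ----- A's sentinel scan vs B's keyed minimum -----

-- one comparison step of min(phones, key=lambda p: (-T(p), p))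
def pvBet (T : String → Int) (m p : String) : String :=
  if T p > T m then p else if T p = T m then (if p < m then p else m) else m

lemma scan_skip (T : String → Int) (P0 : List String) (h : ∀ p ∈ P0, T p < -1) :
    (P0.map (fun p => (p, T p))).foldl solutionScanA (-1, none) = (-1, none) := by
  induction P0 with
  | nil => rfl
  | cons p t ih =>
      have hp := h p List.mem_cons_self
      simp only [List.map_cons, List.foldl_cons]
      rw [show solutionScanA (-1, none) (p, T p) = ((-1 : Int), (none : Option String)) by
        unfold solutionScanA
        simp only
        rw [if_neg (by omega), if_neg (by omega)]]
      exact ih (fun q hq => h q (List.mem_cons_of_mem _ hq))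

lemma scan_live (T : String → Int) (rest : List String) : ∀ m,
    (rest.map (fun p => (p, T p))).foldl solutionScanA (T m, some m) =
      ((T (rest.foldl (pvBet T) m)), some (rest.foldl (pvBet T) m)) := by
  induction rest with
  | nil => intro m; rfl
  | cons p t ih =>
      intro m
      simp only [List.map_cons, List.foldl_cons]
      rw [show solutionScanA (T m, some m) (p, T p) = (T (pvBet T m p), some (pvBet T m p)) by
        unfold solutionScanA pvBet
        by_cases h1 : T p > T m
        · simp [h1]
        · by_cases h2 : T p = T m
          · by_cases h3 : p < m <;> simp [h2, h3]
          · simp [h1, h2]]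
      exact ih (pvBet T m p)

lemma foldl_some {α : Type} (f : α → α → α) (g : Option α → α → Option α)
    (hg : ∀ m x, g (some m) x = some (f m x)) :
    ∀ (t : List α) (x : α), t.foldl g (some x) = some (t.foldl f x) := by
  intro t
  induction t with
  | nil => intro x; rfl
  | cons h t ih => intro x; rw [List.foldl_cons, hg, List.foldl_cons]; exact ih (f x h)

lemma min2_eq_foldl (T : String → Int) (x : String) (t : List String) :
    PySem.List.min2? (x :: t) (fun p => -(T p)) (fun p => p) = some (t.foldl (pvBet T) x) := by
  unfold PySem.List.min2?
  rw [List.foldl_cons]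
  exact foldl_some (pvBet T) _ (fun m y => by
    unfold pvBet
    rcases lt_trichotomy (T y) (T m) with hlt | heq | hgt
    · rw [if_neg (by omega), if_neg (by omega)]
      simp [show ¬((-(T y) : Int) < -(T m)) by omega, show ((-(T m) : Int) < -(T y)) by omega]
    · rw [if_neg (by omega), if_pos heq]
      by_cases h3 : y < m <;>
        simp [show ¬((-(T y) : Int) < -(T m)) by omega,
          show ¬((-(T m) : Int) < -(T y)) by omega, h3]
    · rw [if_pos (by omega)]
      simp [show ((-(T y) : Int) < -(T m)) by omega]) t x

lemma bet_skip (T : String → Int) (q : String) (rest : List String) (hq : T q > -1) :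
    ∀ (pref : List String) (cur : String), T cur < -1 → (∀ p ∈ pref, T p < -1) →
    (pref ++ q :: rest).foldl (pvBet T) cur = rest.foldl (pvBet T) q := by
  intro pref
  induction pref with
  | nil =>
      intro cur hcur _
      rw [List.nil_append, List.foldl_cons]
      congr 1
      unfold pvBet
      rw [if_pos (by omega)]
  | cons p pref' ih =>
      intro cur hcur hpref
      rw [List.cons_append, List.foldl_cons]
      have hp : T p < -1 := hpref p List.mem_cons_self
      have : T (pvBet T cur p) < -1 := by
        unfold pvBet
        split_ifs <;> omega
      exact ih _ this (fun r hr => hpref r (List.mem_cons_of_mem _ hr))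

-- ----- the two final sums -----

lemma foldl_sum_ne (r : String) (l : List (String × Int)) : ∀ (init : Int),
    l.foldl (fun tc kv => if some kv.1 ≠ some r then tc + kv.2 else tc) init =
      init + ((l.filter (fun kv => decide (kv.1 ≠ r))).map (fun kv => kv.2)).sum := by
  induction l with
  | nil => intro init; simp
  | cons kv t ih =>
      intro init
      rw [List.foldl_cons]
      by_cases h : kv.1 = r
      · rw [if_neg (by simp [h]), ih]
        simp [h]
      · rw [if_pos (by simp [h]), ih]
        simp only [List.filter_cons, decide_eq_true_eq]
        rw [if_pos (by simp [h])]
        simp only [List.map_cons, List.sum_cons]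
        ring

lemma sum_indicator (a : String) (c : Int) (l : List String) (hnd : l.Nodup) :
    (l.map (fun p => if a = p then c else 0)).sum = if a ∈ l then c else 0 := by
  induction l with
  | nil => simp
  | cons p t ih =>
      rw [List.nodup_cons] at hnd
      simp only [List.map_cons, List.sum_cons, List.mem_cons]
      by_cases h : a = p
      · subst h
        rw [if_pos rfl, if_pos (Or.inl rfl)]
        have hz : ∀ q ∈ t, (if a = q then c else 0) = (fun _ => (0 : Int)) q := by
          intro q hq
          rw [if_neg]
          intro he
          exact hnd.1 (by rw [he]; exact hq)
        rw [List.map_congr_left hz]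
        simp
      · rw [if_neg h, ih hnd.2]
        by_cases ht : a ∈ t <;> simp [h, ht]

lemma pvCsum_cons (x : Int × String) (R : List (Int × String)) (p : String) :
    pvCsum (x :: R) p = (if x.2 = p then pvCost x.1 else 0) + pvCsum R p := by
  rw [pvCsum, pvCsum, List.filter_cons]
  by_cases h : x.2 = p <;> simp [h]

lemma sum_partition (r : String) (P : List String) (hnd : P.Nodup) :
    ∀ (R : List (Int × String)), (∀ x ∈ R, x.2 ∈ P) →
    ((P.filter (fun p => decide (p ≠ r))).map (pvCsum R)).sum =
      ((R.filter (fun x => decide (x.2 ≠ r))).map (fun x => pvCost x.1)).sum := by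
  intro R
  induction R with
  | nil =>
      intro _
      rw [show ((P.filter (fun p => decide (p ≠ r))).map (pvCsum [])) =
          (P.filter (fun p => decide (p ≠ r))).map (fun _ => 0) from
        List.map_congr_left (fun q _ => by simp [pvCsum])]
      simp
  | cons x R' ih =>
      intro hcov
      have hx : x.2 ∈ P := hcov x List.mem_cons_self
      rw [show ((P.filter (fun p => decide (p ≠ r))).map (pvCsum (x :: R'))) =
          (P.filter (fun p => decide (p ≠ r))).map
            (fun p => (if x.2 = p then pvCost x.1 else 0) + pvCsum R' p) from
        List.map_congr_left (fun q _ => pvCsum_cons x R' q)]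
      rw [List.sum_map_add]
      rw [sum_indicator _ _ _ (List.Nodup.filter _ hnd)]
      rw [ih (fun y hy => hcov y (List.mem_cons_of_mem _ hy))]
      rw [List.filter_cons]
      by_cases h : x.2 = r
      · rw [if_neg (by simp [List.mem_filter, h]), if_neg (by simp [h])]
        simp
      · rw [if_pos (List.mem_filter.mpr ⟨hx, by simp [h]⟩), if_pos (by simp [h])]
        simp

-- deduplication never moves the FIRST element failing a predicate
lemma head_dropWhile_dedup (pred : String → Bool) (L : List String) : ∀ acc : List String,
    (((L.foldl (fun acc x => if x ∈ acc then acc else acc ++ [x]) acc).dropWhile pred).head?) =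
      (((acc ++ L).dropWhile pred).head?) := by
  induction L with
  | nil => intro acc; rw [List.foldl_nil, List.append_nil]
  | cons x L' ih =>
      intro acc
      rw [List.foldl_cons]
      by_cases hx : x ∈ acc
      · rw [if_pos hx, ih]
        match hda : acc.dropWhile pred with
        | a :: da =>
            rw [List.dropWhile_append, List.dropWhile_append, hda]
            simp
        | [] =>
            rw [List.dropWhile_append, List.dropWhile_append, hda]
            simp only [List.isEmpty_nil]
            have hpx : pred x = true := by
              have := List.dropWhile_eq_nil_iff.mp hda
              exact this x hx
            rw [List.dropWhile_cons, hpx]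
            simp
      · rw [if_neg hx, ih, List.append_assoc, List.singleton_append]
  
lemma firstGE_phones (T : String → Int) (R : List (Int × String)) :
    ((R.dropWhile (fun r => decide (T r.2 < -1))).head?).map (fun r => r.2) =
      ((pvPhones R).dropWhile (fun p => decide (T p < -1))).head? := by
  rw [pvPhones,
    show (R.foldl (fun acc r => if r.2 ∈ acc then acc else acc ++ [r.2]) []) =
      ((R.map (fun r => r.2)).foldl (fun acc x => if x ∈ acc then acc else acc ++ [x]) []) from
      by rw [List.foldl_map],
    head_dropWhile_dedup, List.nil_append, List.dropWhile_map, List.head?_map]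
  rfl

lemma scanA_seed (T : String → Int) (q : String) (hq : T q > -1) :
    solutionScanA (-1, none) (q, T q) = (T q, some q) := by
  unfold solutionScanA
  simp only
  rw [if_pos (by omega : (q, T q).2 > ((-1 : Int), (none : Option String)).1)]

lemma solution_main (S : String) (hpre : Pre_solution S) (hD : ¬ D_solution S) :
    solution S = solution_alt S := by
  unfold solution solution_alt
  dsimp only
  rw [dicts_empty, dicts_fold, recB_eq]
  simp only [List.nil_append]
  have hRdef : pvRecsL (pvSplit S "\n") = pvRecs S := rfl
  rw [hRdef]
  generalize hRe : pvRecs S = R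
  cases R with
  | nil => simp [pvDicts, pvPhones]
  | cons x R' =>
    rw [if_neg (by simp)]
    rw [phones_eq]
    have htot : (fun p => -((((x :: R').map pvRecF).filter (fun r => r.1 == p)).map
        (fun r => r.2.1)).sum) = fun p => -(pvTsum (x :: R') p) := by
      funext p
      rw [total_eq]
    rw [htot]
    set T := pvTsum (x :: R') with hT
    set P := pvPhones (x :: R') with hP
    -- locate the first phone whose total is ≥ -1
    have hex : ∃ p ∈ P, -1 ≤ T p := by
      unfold D_solution at hD
      rw [hRe] at hD
      push_neg at hD
      obtain ⟨y, hy, hyT⟩ := hD (by simp)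
      exact ⟨y.2, by rw [hP, mem_pvPhones]; exact List.mem_map_of_mem hy, hyT⟩
    have hdw : P.dropWhile (fun p => decide (T p < -1)) ≠ [] := by
      intro hnil
      obtain ⟨p, hpP, hp⟩ := hex
      have := List.dropWhile_eq_nil_iff.mp hnil p hpP
      simp at this
      omega
    match hdwE : P.dropWhile (fun p => decide (T p < -1)) with
    | [] => exact absurd hdwE hdw
    | q :: rest =>
      have hfirst : pvFirstGE S = some q := by
        unfold pvFirstGE
        rw [hRe, firstGE_phones, ← hT, ← hP, hdwE]
        rfl
      have hq : T q > -1 := by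
        have h2 := hpre.2
        unfold pvNoTypeError at h2
        rw [hfirst] at h2
        have := of_decide_eq_true h2
        rwa [hRe, ← hT] at this
      have htw : ∀ p ∈ P.takeWhile (fun p => decide (T p < -1)), T p < -1 := by
        intro p hp
        have := List.mem_takeWhile_imp hp
        simpa using this
      have hsplit : P = P.takeWhile (fun p => decide (T p < -1)) ++ q :: rest := by
        rw [← hdwE, List.takeWhile_append_dropWhile]
      set r := rest.foldl (pvBet T) q with hr
      -- A's sentinel scan lands on r
      have hscan : ((pvDicts (x :: R')).1.items).foldl solutionScanA (-1, none) = (T r, some r) := by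
        have hitems : (pvDicts (x :: R')).1.items = P.map (fun p => (p, T p)) := rfl
        rw [hitems, hsplit, List.map_append, List.foldl_append,
          scan_skip T _ htw, List.map_cons, List.foldl_cons, scanA_seed T q hq, scan_live]
      -- B's keyed minimum is the same phone
      have hmin : PySem.List.min2? P (fun p => -(T p)) (fun p => p) = some r := by
        match htwE : P.takeWhile (fun p => decide (T p < -1)) with
        | [] =>
            rw [hsplit, htwE, List.nil_append, min2_eq_foldl]
        | t0 :: tw' =>
            rw [hsplit, htwE, List.cons_append, min2_eq_foldl]
            rw [bet_skip T q rest hq tw' t0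
              (htw t0 (by rw [htwE]; exact List.mem_cons_self))
              (fun p hp => htw p (by rw [htwE]; exact List.mem_cons_of_mem _ hp))]
      simp only [hscan]
      rw [hmin]
      -- both final sums count the costs of the lines of every phone except r
      have hitems2 : (pvDicts (x :: R')).2.items =
          (pvPhones (x :: R')).map (fun p => (p, pvCsum (x :: R') p)) := rfl
      rw [hitems2, foldl_sum_ne, List.filter_map, List.map_map]
      dsimp only
      rw [costfilter_eq]
      have hcov : ∀ y ∈ x :: R', y.2 ∈ pvPhones (x :: R') := by
        intro y hy
        rw [mem_pvPhones]
        exact List.mem_map_of_mem hy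
      have hpart := sum_partition r (pvPhones (x :: R')) (nodup_pvPhones _) (x :: R') hcov
      rw [← hpart]
      simp only [zero_add]
      rfl

-- ----- A ≠ B everywhere inside D_ : the excluded phone's cost is strictly negative there -----

lemma fd_eq (a b : Int) (hb : 0 < b) : PySem.Int.floordiv a b = a / b := by
  unfold PySem.Int.floordiv
  rw [Int.fdiv_eq_ediv, if_pos (Or.inl (le_of_lt hb))]
  ring

lemma rne_le (num den : Int) : pvRne num den ≤ PySem.Int.floordiv num den + 1 := by
  unfold pvRne
  dsimp only
  split_ifs <;> omega

-- every call's cost is at most 3 cents per second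
lemma cost_le (s : Int) : pvCost s ≤ 3 * s := by
  unfold pvCost
  by_cases h : s < 300
  · rw [if_pos h]; omega
  · rw [if_neg h]
    unfold pvCeilF
    set k := PySem.Int.floordiv s 60 with hk
    have hk' : k = s / 60 := fd_eq s 60 (by norm_num)
    have hk60 : k * 60 ≤ s := by rw [hk']; exact Int.ediv_mul_le s (by norm_num)
    have hslt : s < (k + 1) * 60 := by rw [hk']; exact Int.lt_ediv_add_one_mul_self s (by norm_num)
    have hk5 : 5 ≤ k := by omega
    set bl := k.toNat.log2 + 1 with hbl
    by_cases hb : bl ≤ 53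
    · rw [if_pos hb]
      set s2 : Int := 2 ^ (53 - bl) with hs2
      have hs2pos : 0 < s2 := by positivity
      set m := pvRne (s * s2) 60 with hm
      have h1 : m ≤ PySem.Int.floordiv (s * s2) 60 + 1 := rne_le _ _
      have h2 : PySem.Int.floordiv (s * s2) 60 < k * s2 + s2 := by
        rw [fd_eq _ _ (by norm_num), Int.ediv_lt_iff_lt_mul (by norm_num)]
        calc s * s2 < ((k + 1) * 60) * s2 := by
              exact mul_lt_mul_of_pos_right hslt hs2pos
          _ = (k * s2 + s2) * 60 := by ring
      have hm_le : m ≤ (k + 1) * s2 := by nlinarith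
      have hceil : -(PySem.Int.floordiv (-m) s2) ≤ k + 1 := by
        rw [fd_eq _ _ hs2pos]
        have hle : -(k + 1) ≤ (-m) / s2 := by
          rw [Int.le_ediv_iff_mul_le hs2pos]
          nlinarith
        omega
      nlinarith
    · rw [if_neg hb]
      have hble : 54 ≤ bl := by omega
      set d : Int := 2 ^ (bl - 53) with hd
      have hdpos : 0 < d := by positivity
      set m := pvRne s (60 * d) with hm
      have h1 : m ≤ PySem.Int.floordiv s (60 * d) + 1 := rne_le _ _
      set F := PySem.Int.floordiv s (60 * d) with hF
      have hF60 : 60 * (F * d) ≤ s := by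
        have := Int.ediv_mul_le s (b := 60 * d) (by positivity)
        rw [hF, fd_eq _ _ (by positivity)]
        nlinarith [this]
      have hk2 : (4503599627370496 : Int) * d ≤ k := by
        have hkpos : k.toNat ≠ 0 := by omega
        have hlog := Nat.log2_self_le hkpos
        have hsplit : k.toNat.log2 = 52 + (bl - 53) := by omega
        rw [hsplit, pow_add] at hlog
        have : ((2 : Nat) ^ 52 * 2 ^ (bl - 53) : Nat) ≤ (k.toNat : Nat) := hlog
        have hcast : ((2 : Nat) ^ 52 * 2 ^ (bl - 53) : Int) ≤ (k.toNat : Int) := by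
          exact_mod_cast this
        push_cast at hcast
        rw [hd]
        have hknn : (k.toNat : Int) = k := by omega
        rw [hknn] at hcast
        exact le_trans (by norm_num) hcast
      have hd300 : 300 * d ≤ s := by nlinarith
      have hmd : m * d ≤ F * d + d := by nlinarith
      nlinarith

lemma csum_le_tsum (b : String) : ∀ R : List (Int × String), pvCsum R b ≤ 3 * pvTsum R b := by
  intro R
  induction R with
  | nil => simp [pvCsum, pvTsum]
  | cons r R' ih =>
      rw [pvCsum_cons, pvTsum]
      by_cases h : r.2 = b
      · rw [if_pos h, if_pos h]
        have := cost_le r.1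
        omega
      · rw [if_neg h, if_neg h]
        omega

lemma bet_mem (T : String → Int) : ∀ (t : List String) (x : String),
    t.foldl (pvBet T) x = x ∨ t.foldl (pvBet T) x ∈ t := by
  intro t
  induction t with
  | nil => exact fun x => Or.inl rfl
  | cons h t ih =>
      intro x
      rw [List.foldl_cons]
      rcases ih (pvBet T x h) with hh | hh
      · rw [hh]
        unfold pvBet
        split_ifs
        · exact Or.inr List.mem_cons_self
        · exact Or.inr List.mem_cons_self
        · exact Or.inl rfl
        · exact Or.inl rfl
      · exact Or.inr (List.mem_cons_of_mem _ hh)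

lemma foldl_sum_all (l : List (String × Int)) : ∀ init : Int,
    l.foldl (fun tc kv => if some kv.1 ≠ (none : Option String) then tc + kv.2 else tc) init =
      init + (l.map (fun kv => kv.2)).sum := by
  induction l with
  | nil => intro init; simp
  | cons kv t ih =>
      intro init
      rw [List.foldl_cons, if_pos (by simp), ih]
      simp only [List.map_cons, List.sum_cons]
      ring

lemma sum_partition_all (P : List String) (hnd : P.Nodup) :
    ∀ R : List (Int × String), (∀ x ∈ R, x.2 ∈ P) →
    (P.map (pvCsum R)).sum = (R.map (fun x => pvCost x.1)).sum := by
  intro R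
  induction R with
  | nil =>
      intro _
      rw [show (P.map (pvCsum [])) = P.map (fun _ => 0) from
        List.map_congr_left (fun q _ => by simp [pvCsum])]
      simp
  | cons x R' ih =>
      intro hcov
      have hx : x.2 ∈ P := hcov x List.mem_cons_self
      rw [show (P.map (pvCsum (x :: R'))) =
          P.map (fun p => (if x.2 = p then pvCost x.1 else 0) + pvCsum R' p) from
        List.map_congr_left (fun q _ => pvCsum_cons x R' q)]
      rw [List.sum_map_add, sum_indicator _ _ _ hnd, if_pos hx,
        ih (fun y hy => hcov y (List.mem_cons_of_mem _ hy))]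
      simp

lemma sum_split (b : String) : ∀ R : List (Int × String),
    ((R.filter (fun r => decide (r.2 ≠ b))).map (fun r => pvCost r.1)).sum + pvCsum R b =
      (R.map (fun r => pvCost r.1)).sum := by
  intro R
  induction R with
  | nil => simp [pvCsum]
  | cons r R' ih =>
      rw [pvCsum_cons, List.filter_cons]
      by_cases h : r.2 = b
      · rw [if_neg (by simp [h]), if_pos h]
        simp only [List.map_cons, List.sum_cons]
        omega
      · rw [if_pos (by simp [h]), if_neg h]
        simp only [List.map_cons, List.sum_cons]
        omega

lemma tight_main (S : String) (hD : D_solution S) : solution S ≠ solution_alt S := by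
  obtain ⟨hne, hall⟩ := hD
  unfold solution solution_alt
  dsimp only
  rw [dicts_empty, dicts_fold, recB_eq]
  simp only [List.nil_append]
  have hRdef : pvRecsL (pvSplit S "\n") = pvRecs S := rfl
  rw [hRdef]
  generalize hRe : pvRecs S = R at hne hall ⊢
  cases R with
  | nil => exact absurd rfl hne
  | cons x R' =>
    rw [if_neg (by simp)]
    rw [phones_eq]
    have htot : (fun p => -((((x :: R').map pvRecF).filter (fun r => r.1 == p)).map
        (fun r => r.2.1)).sum) = fun p => -(pvTsum (x :: R') p) := by
      funext p
      rw [total_eq]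
    rw [htot]
    have hallP : ∀ p ∈ pvPhones (x :: R'), pvTsum (x :: R') p < -1 := by
      intro p hp
      rw [mem_pvPhones] at hp
      obtain ⟨r, hr, hre⟩ := List.mem_map.mp hp
      rw [← hre]
      exact hall r hr
    -- A's scan never leaves the sentinel: m = (-1, none)
    have hscan0 : ((pvDicts (x :: R')).1.items).foldl solutionScanA (-1, none) =
        ((-1 : Int), (none : Option String)) := by
      have hitems : (pvDicts (x :: R')).1.items =
          (pvPhones (x :: R')).map (fun p => (p, pvTsum (x :: R') p)) := rfl
      rw [hitems]
      exact scan_skip _ _ hallP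
    simp only [hscan0]
    -- B's minimum exists: the phone list is non-empty
    have hxP : x.2 ∈ pvPhones (x :: R') := by
      rw [mem_pvPhones]
      exact List.mem_map_of_mem List.mem_cons_self
    match hPe : pvPhones (x :: R') with
    | [] => rw [hPe] at hxP; exact absurd hxP (by simp)
    | q0 :: P'' =>
      rw [min2_eq_foldl]
      set b := P''.foldl (pvBet (pvTsum (x :: R'))) q0 with hb
      have hbP : b ∈ pvPhones (x :: R') := by
        rw [hPe]
        rcases bet_mem _ P'' q0 with hh | hh
        · rw [hb, hh]; exact List.mem_cons_self
        · exact List.mem_cons_of_mem _ hh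
      have hTb : pvTsum (x :: R') b < -1 := hallP b hbP
      have hCb : pvCsum (x :: R') b < 0 := by
        have := csum_le_tsum b (x :: R')
        omega
      -- A bills everything, B bills everything except b's (strictly negative) cost
      have hitems2 : (pvDicts (x :: R')).2.items =
          (pvPhones (x :: R')).map (fun p => (p, pvCsum (x :: R') p)) := rfl
      rw [hitems2]
      dsimp only
      rw [foldl_sum_all, List.map_map]
      rw [show ((fun kv : String × Int => kv.2) ∘ fun p => (p, pvCsum (x :: R') p)) =
        pvCsum (x :: R') from rfl]
      rw [sum_partition_all _ (nodup_pvPhones _) _ (fun y hy => by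
        rw [mem_pvPhones]; exact List.mem_map_of_mem hy)]
      rw [costfilter_eq]
      have hsplit := sum_split b (x :: R')
      omega

set_option maxRecDepth 20000

-- ===== VERDICT (by name: the statement is the Claim_ definition above) =====
theorem solution_spec : Claim_unchanged_solution := by
  intro S _ hpre
  unfold Spec_solution
  intro hD
  exact solution_main S hpre hD
theorem solution_changed : Claim_changed_solution := by
  unfold Claim_changed_solution; decide
theorem solution_tight : Claim_exact_solution := by
  intro S _ _ hD
  exact tight_main S hD
@[simp] theorem solution_raises : Claim_raises_solution := by
  unfold Claim_raises_solution
  refine ⟨?_, by decide⟩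
  intro S _ hrai hpre
  have h2 := hpre.2
  have hh := hrai.2
  unfold pvNoTypeError at h2
  unfold pvRaiseHead at hh
  match hf : pvFirstGE S with
  | none => rw [hf] at hh; exact absurd hh (by simp)
  | some q =>
      rw [hf] at h2 hh
      have := of_decide_eq_true h2
      have := of_decide_eq_true hh
      omega
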